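-- pv_equiv track=rewrite | github.com/jrmanrique/codingproblems | dailyprogrammer/python/239_hard.py | threes
-- ===== SOURCE A (Python) =====
-- def threes(num):
--     def get_move(num):
--         tree = {0: [0], 1: [-1, 2], 2: [1, -2]}
--         if num == 2:
--             return [1]
--         return tree[num % 3]
--
--     solutions = []
--     stack = [([num], get_move(num), [])]
--     while stack:
--         path, moves, real = stack.pop()
--         if path[-1] == 1:
--             solutions.append(real)
--             continue
--         for move in moves:
--             new = (path[-1] + move) // 3
--             stack.append((path + [new], get_move(new), real + [move]))
--
--     return solutions
-- ===== SOURCE B (Python) =====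
-- def threes(num):
--     def get_move(n):
--         tree = {0: [0], 1: [-1, 2], 2: [1, -2]}
--         if n == 2:
--             return [1]
--         return tree[n % 3]
--
--     def rec(current, real):
--         if current == 1:
--             return [real]
--         out = []
--         for move in reversed(get_move(current)):
--             out += rec((current + move) // 3, real + [move])
--         return out
--
--     return rec(num, [])
-- ===== Notes on version B (the rewrite author's own statement) =====
-- stated objective: simpler
-- what changed: Replaces A's explicit stack of (path, moves, real) tuples driven by a while loop with a direct recursive DFS rec(current, real) that iterates the moves in reversed order to reproduce A's LIFO traversal order exactly; no path lists or stack tuples are built.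
-- outside the precondition, e.g. on threes(0): A does not finish within the time limit, B raises RecursionError
import Mathlib
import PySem

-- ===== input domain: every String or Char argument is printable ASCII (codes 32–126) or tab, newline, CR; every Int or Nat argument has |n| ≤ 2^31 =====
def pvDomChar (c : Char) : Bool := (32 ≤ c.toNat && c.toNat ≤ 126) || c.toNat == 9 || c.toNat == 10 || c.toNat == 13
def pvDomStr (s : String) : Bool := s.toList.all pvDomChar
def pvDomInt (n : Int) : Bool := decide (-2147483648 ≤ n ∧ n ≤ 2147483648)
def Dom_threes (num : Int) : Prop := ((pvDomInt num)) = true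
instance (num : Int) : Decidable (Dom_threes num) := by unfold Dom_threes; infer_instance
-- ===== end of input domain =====

-- B replaces A's explicit stack loop by a recursive DFS (iterating moves in reverse to keep A's
-- LIFO order); objective: simpler (no stack tuples, no path list is carried around).

-- ===== PORT A =====
-- shared helper: the inner get_move (textually identical in A and in B)
def getMove (num : Int) : List Int :=
  if num == 2 then [1]
  else ((PySem.Dict.ofList [((0 : Int), [(0 : Int)]), (1, [-1, 2]), (2, [1, -2])]).get?
          (PySem.Int.mod num 3)).getD []
  -- the .getD [] default is unreachable: num % 3 ∈ {0,1,2} is always a key of the dict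

-- weight of a stack item (3 ^ its current value), used only as the termination measure of A's loop
def pvWeight (it : List Int × List Int × List Int) : Nat :=
  3 ^ ((PySem.List.pyGet? it.1 (-1)).getD 0).toNat

def pvStackW (st : List (List Int × List Int × List Int)) : Nat := (st.map pvWeight).sum

lemma pvWeight_pos (it : List Int × List Int × List Int) : 0 < pvWeight it :=
  Nat.pow_pos (by norm_num)

lemma pvStackW_cons (it : List Int × List Int × List Int)
    (rest : List (List Int × List Int × List Int)) :
    pvStackW (it :: rest) = pvWeight it + pvStackW rest := by
  simp [pvStackW]

-- A's while loop, stack held head-as-top; the dite guard only makes the loop total (it always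
-- holds when the loop starts from num ≥ 1, as proved below), the `none` branch is Python's
-- IndexError on an empty path, which never occurs
def threesLoop (stack : List (List Int × List Int × List Int)) (solutions : List (List Int)) :
    List (List Int) :=
  match stack with
  | [] => solutions
  | (path, moves, real) :: rest =>
    match PySem.List.pyGet? path (-1) with
    | none => solutions
    | some c =>
      if c == 1 then threesLoop rest (solutions ++ [real])
      else
        let newStack := moves.foldl (fun st move =>
          (path ++ [PySem.Int.floordiv (c + move) 3],
           getMove (PySem.Int.floordiv (c + move) 3),
           real ++ [move]) :: st) rest
        if h : pvStackW newStack < pvStackW ((path, moves, real) :: rest) then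
          threesLoop newStack solutions
        else solutions
termination_by pvStackW stack
decreasing_by
  · rw [pvStackW_cons]; have := pvWeight_pos (path, moves, real); omega
  · exact h

def threes (num : Int) : List (List Int) :=
  threesLoop [([num], getMove num, [])] []

-- ===== PORT B =====
lemma getMove_rev_len_lt (n : Int) : ((getMove n).reverse).length < 3 := by
  unfold getMove
  split
  · simp
  · have h : PySem.Int.mod n 3 = 0 ∨ PySem.Int.mod n 3 = 1 ∨ PySem.Int.mod n 3 = 2 := by
      rw [PySem.Int.mod_eq_emod_of_pos (by norm_num)]; omega
    rcases h with h | h | h <;> rw [h] <;> decide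

-- B's rec / its for-loop over reversed(get_move(current)); the dite guard only makes the
-- recursion total (it always holds when current ≥ 2, as proved below)
mutual
  def threesRec (current : Int) (real : List Int) : List (List Int) :=
    if current == 1 then [real]
    else threesGo current real ((getMove current).reverse)
  termination_by (current.toNat, 3)
  decreasing_by
    exact Prod.Lex.right _ (getMove_rev_len_lt current)

  def threesGo (current : Int) (real : List Int) (ms : List Int) : List (List Int) :=
    match ms with
    | [] => []
    | move :: rest =>
      (if h : (PySem.Int.floordiv (current + move) 3).toNat < current.toNat then
          threesRec (PySem.Int.floordiv (current + move) 3) (real ++ [move])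
        else []) ++ threesGo current real rest
  termination_by (current.toNat, ms.length)
  decreasing_by
    · exact Prod.Lex.left _ _ h
    · exact Prod.Lex.right _ (by simp)
end

def threes_alt (num : Int) : List (List Int) := threesRec num []

-- ===== PRECONDITION & SPEC =====
-- A terminates exactly on num ≥ 1: for num ≤ 0 the loop revisits 0 (or drifts below) forever,
-- so A never returns there (and B recurses forever); Pre_ excludes exactly those inputs.
def Pre_threes (num : Int) : Prop := 1 ≤ num
instance (num : Int) : Decidable (Pre_threes num) := by unfold Pre_threes; infer_instance
def pvWitness_threes : Int := 3

def Spec_threes (num : Int) (out : List (List Int)) : Prop := out = threes_alt num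
instance (num : Int) (out : List (List Int)) : Decidable (Spec_threes num out) := by
  unfold Spec_threes; infer_instance

-- ===== CLAIM (what is proved, stated in full; the proofs are below) =====
def Claim_equal_threes : Prop := ∀ (num : Int), Dom_threes num → Pre_threes num →
  Spec_threes num (threes num)

-- ===== LEMMAS AND PROOFS =====

-- every move m that A/B take from a value c ≥ 2 leads to a new value in [1, c)
lemma getMove_spec (c m : Int) (hc : 2 ≤ c) (hm : m ∈ getMove c) :
    1 ≤ PySem.Int.floordiv (c + m) 3 ∧ PySem.Int.floordiv (c + m) 3 < c := by
  rw [PySem.Int.floordiv_eq_ediv_of_pos (by norm_num)]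
  unfold getMove at hm
  by_cases h2 : c = 2
  · subst h2; simp at hm; subst hm; omega
  · rw [if_neg (by simp [h2]), PySem.Int.mod_eq_emod_of_pos (by norm_num)] at hm
    have h3 : c % 3 = 0 ∨ c % 3 = 1 ∨ c % 3 = 2 := by omega
    have e0 : ((PySem.Dict.ofList [((0 : Int), [(0 : Int)]), (1, [-1, 2]), (2, [1, -2])]).get?
        0).getD ([] : List Int) = [0] := by decide
    have e1 : ((PySem.Dict.ofList [((0 : Int), [(0 : Int)]), (1, [-1, 2]), (2, [1, -2])]).get?
        1).getD ([] : List Int) = [-1, 2] := by decide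
    have e2 : ((PySem.Dict.ofList [((0 : Int), [(0 : Int)]), (1, [-1, 2]), (2, [1, -2])]).get?
        2).getD ([] : List Int) = [1, -2] := by decide
    rcases h3 with h | h | h <;> rw [h] at hm
    · rw [e0] at hm; simp at hm; omega
    · rw [e1] at hm; simp at hm; rcases hm with hm | hm <;> omega
    · rw [e2] at hm; simp at hm; rcases hm with hm | hm <;> omega

lemma pvStackW_append (a b : List (List Int × List Int × List Int)) :
    pvStackW (a ++ b) = pvStackW a + pvStackW b := by
  simp [pvStackW]

lemma foldl_cons_rev {α β : Type} (f : α → β) (ms : List α) (rest : List β) :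
    ms.foldl (fun st m => f m :: st) rest = (ms.map f).reverse ++ rest := by
  induction ms generalizing rest with
  | nil => simp
  | cons m t ih => simp [List.foldl_cons, ih]

-- invariant on stack items: path ends with a value ≥ 1 and moves = get_move of that value
def GoodIt (it : List Int × List Int × List Int) : Prop :=
  ∃ c : Int, PySem.List.pyGet? it.1 (-1) = some c ∧ 1 ≤ c ∧ it.2.1 = getMove c

lemma getMove_len_le (n : Int) : (getMove n).length ≤ 2 := by
  have := getMove_rev_len_lt n
  simp at this; omega

lemma go_eq (c : Int) (real : List Int) (ms : List Int)
    (h : ∀ m ∈ ms, 1 ≤ PySem.Int.floordiv (c + m) 3 ∧ PySem.Int.floordiv (c + m) 3 < c) :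
    threesGo c real ms
      = (ms.map (fun m => threesRec (PySem.Int.floordiv (c + m) 3) (real ++ [m]))).flatten := by
  induction ms with
  | nil => simp [threesGo]
  | cons m t ih =>
    obtain ⟨h1, h2⟩ := h m (List.mem_cons_self ..)
    rw [threesGo]
    rw [dif_pos (by omega), ih (fun x hx => h x (List.mem_cons_of_mem _ hx))]
    simp

lemma loop_eq : ∀ (n : Nat) (st : List (List Int × List Int × List Int)),
    pvStackW st < n → (∀ it ∈ st, GoodIt it) → ∀ acc,
    threesLoop st acc
      = acc ++ (st.map (fun it =>
          threesRec ((PySem.List.pyGet? it.1 (-1)).getD 0) it.2.2)).flatten := by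
  intro n
  induction n with
  | zero => intro st h; exact absurd h (Nat.not_lt_zero _)
  | succ k ih =>
    intro st hlt hgood acc
    match st with
    | [] => rw [threesLoop]; simp
    | (path, moves, real) :: rest =>
      obtain ⟨c, hc, hc1, hmv⟩ := hgood _ (List.mem_cons_self ..)
      simp only at hc hmv
      have hwpos := pvWeight_pos (path, moves, real)
      have hrest : pvStackW rest < k := by rw [pvStackW_cons] at hlt; omega
      by_cases h1 : c = 1
      · subst h1
        rw [threesLoop]
        simp only [hc]
        rw [ih rest hrest (fun it hit => hgood it (List.mem_cons_of_mem _ hit)) (acc ++ [real])]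
        have hr1 : threesRec 1 real = [real] := by rw [threesRec.eq_def]; simp
        simp [hc, hr1]
      · have hc2 : 2 ≤ c := by omega
        -- the pushed children
        have hbound : ∀ m ∈ moves, 1 ≤ PySem.Int.floordiv (c + m) 3 ∧
            PySem.Int.floordiv (c + m) 3 < c := by
          intro m hm; exact getMove_spec c m hc2 (hmv ▸ hm)
        set mk : Int → List Int × List Int × List Int := fun move =>
          (path ++ [PySem.Int.floordiv (c + move) 3],
           getMove (PySem.Int.floordiv (c + move) 3), real ++ [move]) with hmk
        have hchildW : ∀ m ∈ moves, pvWeight (mk m) ≤ 3 ^ (c.toNat - 1) := by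
          intro m hm
          obtain ⟨hb1, hb2⟩ := hbound m hm
          simp only [hmk, pvWeight, PySem.List.pyGet?_neg_one_append_singleton, Option.getD_some]
          exact Nat.pow_le_pow_right (by norm_num) (by omega)
        have hguard : pvStackW ((moves.map mk).reverse ++ rest)
            < pvStackW ((path, moves, real) :: rest) := by
          rw [pvStackW_append, pvStackW_cons]
          have hsum : pvStackW ((moves.map mk).reverse) ≤ moves.length * 3 ^ (c.toNat - 1) := by
            unfold pvStackW
            rw [List.map_reverse, List.sum_reverse, List.map_map]
            have := List.sum_le_card_nsmul ((moves.map (pvWeight ∘ mk)))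
              (3 ^ (c.toNat - 1)) (by
                intro x hx
                obtain ⟨m, hm, hxe⟩ := List.mem_map.mp hx
                exact hxe ▸ hchildW m hm)
            simpa using this
          have hlen := getMove_len_le c
          have hwe : pvWeight (path, moves, real) = 3 ^ c.toNat := by
            simp [pvWeight, hc]
          have hp : 2 * 3 ^ (c.toNat - 1) < 3 ^ c.toNat := by
            have h1 : c.toNat = (c.toNat - 1) + 1 := by omega
            have h2 : (3 : Nat) ^ c.toNat = 3 ^ (c.toNat - 1) * 3 := by
              conv_lhs => rw [h1]
              rw [pow_succ]
            have := Nat.pow_pos (show 0 < 3 by norm_num) (n := c.toNat - 1)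
            omega
          have : moves.length ≤ 2 := hmv ▸ hlen
          nlinarith [hsum, hwe, hp]
        rw [threesLoop]
        simp only [hc]
        rw [if_neg (by simp [h1])]
        simp only [foldl_cons_rev]
        rw [dif_pos hguard]
        have hgood' : ∀ it ∈ (moves.map mk).reverse ++ rest, GoodIt it := by
          intro it hit
          rcases List.mem_append.mp hit with hl | hr
          · rw [List.mem_reverse] at hl
            obtain ⟨m, hm, he⟩ := List.mem_map.mp hl
            obtain ⟨hb1, _⟩ := hbound m hm
            exact ⟨PySem.Int.floordiv (c + m) 3, by
              simp [← he, hmk, PySem.List.pyGet?_neg_one_append_singleton], hb1, by simp [← he, hmk]⟩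
          · exact hgood it (List.mem_cons_of_mem _ hr)
        rw [ih _ (by omega) hgood' acc]
        congr 1
        rw [List.map_append, List.flatten_append]
        congr 1
        -- head's recursive value equals the flattened children
        have hrec : threesRec c real
            = (((moves.map mk).reverse).map (fun it =>
                threesRec ((PySem.List.pyGet? it.1 (-1)).getD 0) it.2.2)).flatten := by
          rw [threesRec.eq_def, if_neg (by simp [h1]), hmv.symm]
          rw [go_eq c real moves.reverse (fun m hm => hbound m (List.mem_reverse.mp hm))]
          congr 1
          rw [List.map_reverse, List.map_reverse, List.map_map]
          congr 1
          apply List.map_congr_left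
          intro m hm
          simp [hmk, PySem.List.pyGet?_neg_one_append_singleton]
        simp [hrec, hc]

-- ===== VERDICT (by name: the statement is the Claim_ definition above) =====
theorem threes_spec : Claim_equal_threes := by
  intro num _ hpre
  unfold Spec_threes threes threes_alt
  have hg : PySem.List.pyGet? [num] (-1) = some num := by
    rw [PySem.List.pyGet?_neg_one]; rfl
  rw [loop_eq (pvStackW [([num], getMove num, [])] + 1) _ (by omega)
      (by intro it hit; simp at hit; subst hit; exact ⟨num, hg, hpre, rfl⟩) []]
  simp [hg]
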